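-- pv_equiv track=rewrite | github.com/Hsiangpo/OldIron | Japan/src/site_agent/llm_client/helpers.py | _extract_hint_words
-- ===== SOURCE A (Python) =====
-- def _extract_hint_words(text: str) -> list[str]:
--     words = []
--     current = []
--     for ch in text:
--         if "a" <= ch.lower() <= "z":
--             current.append(ch.lower())
--         else:
--             if len(current) >= 4:
--                 words.append("".join(current))
--             current = []
--     if len(current) >= 4:
--         words.append("".join(current))
--     return words
-- ===== SOURCE B (Python) =====
-- def _extract_hint_words(text: str) -> list[str]:
--     # Two-pointer run scanner: find each maximal run of letters in one inner scan,
--     # emit it lowered if it has at least 4 characters.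
--     def is_letter(c):
--         return "a" <= c.lower() <= "z"
--     words = []
--     i, n = 0, len(text)
--     while i < n:
--         if is_letter(text[i]):
--             j = i
--             while j < n and is_letter(text[j]):
--                 j += 1
--             if j - i >= 4:
--                 words.append("".join(c.lower() for c in text[i:j]))
--             i = j
--         else:
--             i += 1
--     return words
-- ===== Notes on version B (the rewrite author's own statement) =====
-- stated objective: alternative
-- what changed: Replaced A's per-character accumulator-list state machine by a two-pointer scanner that locates each maximal letter run with an inner scan and emits it lowered when long enough.
import Mathlib
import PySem

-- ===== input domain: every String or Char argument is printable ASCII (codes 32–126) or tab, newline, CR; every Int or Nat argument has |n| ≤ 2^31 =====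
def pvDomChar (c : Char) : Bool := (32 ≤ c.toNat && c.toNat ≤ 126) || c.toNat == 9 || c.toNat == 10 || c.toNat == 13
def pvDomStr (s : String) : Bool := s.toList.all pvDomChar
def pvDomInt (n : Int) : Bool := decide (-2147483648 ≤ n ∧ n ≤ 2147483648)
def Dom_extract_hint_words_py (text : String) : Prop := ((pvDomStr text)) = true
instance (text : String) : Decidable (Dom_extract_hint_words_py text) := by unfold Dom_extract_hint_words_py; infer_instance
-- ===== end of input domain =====

-- B changes the decomposition only (two-pointer run scanner vs A's accumulator state machine); same O(n) cost, return value proved equal.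

-- ch.lower() for one char (exact on the ASCII domain)
def pvLower (c : Char) : Char := PySem.Chars.lowerChar c

-- the predicate "a" <= ch.lower() <= "z"
def pvIsLetter (c : Char) : Bool := decide ('a' ≤ pvLower c ∧ pvLower c ≤ 'z')

-- ===== PORT A =====
-- A's loop: state (words, current); current holds the lowered chars of the run so far.
def aGo : List Char → List String → List Char → List String
  | [], words, current =>
      if current.length ≥ 4 then words ++ [String.mk current] else words
  | ch :: rest, words, current =>
      if pvIsLetter ch then
        aGo rest words (current ++ [pvLower ch])
      else
        aGo rest (if current.length ≥ 4 then words ++ [String.mk current] else words) []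

def extract_hint_words_py (text : String) : List String :=
  aGo text.toList [] []

-- ===== PORT B =====
-- emit one run (already the full maximal run) if long enough
def pvEmit (run : List Char) : List String :=
  if run.length ≥ 4 then [String.mk (run.map pvLower)] else []

-- B's scanner: at a letter, take the whole maximal run (inner scan) and jump past it.
def bGo : List Char → List String
  | [] => []
  | ch :: rest =>
      if pvIsLetter ch then
        pvEmit (ch :: rest.takeWhile pvIsLetter) ++ bGo (rest.dropWhile pvIsLetter)
      else
        bGo rest
termination_by cs => cs.length
decreasing_by
  · simp only [List.length_cons]
    exact Nat.lt_succ_of_le (List.length_dropWhile_le _ _)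
  · simp

def extract_hint_words_py_alt (text : String) : List String :=
  bGo text.toList

-- ===== PRECONDITION & SPEC =====
def Spec_extract_hint_words_py (text : String) (out : List String) : Prop := out = extract_hint_words_py_alt text
instance (text : String) (out : List String) : Decidable (Spec_extract_hint_words_py text out) := by unfold Spec_extract_hint_words_py; infer_instance

-- ===== CLAIM (what is proved, stated in full; the proofs are below) =====
def Claim_equal_extract_hint_words_py : Prop := ∀ (text : String), Dom_extract_hint_words_py text → Spec_extract_hint_words_py text (extract_hint_words_py text)

-- ===== LEMMAS AND PROOFS =====

-- A's words accumulator is only ever appended to.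
theorem aGo_words (cs : List Char) : ∀ words current,
    aGo cs words current = words ++ aGo cs [] current := by
  induction cs with
  | nil =>
    intro words current
    simp only [aGo]
    split <;> simp
  | cons c cs ih =>
    intro words current
    simp only [aGo]
    split
    · exact ih ..
    · simp only [List.nil_append]
      split
      · rw [ih (words ++ [String.mk current]) [], ih [String.mk current] []]
        simp
      · exact ih words []

-- emit for an already-lowered run
def pvEmit' (run : List Char) : List String :=
  if run.length ≥ 4 then [String.mk run] else []

theorem pvEmit_eq (run : List Char) : pvEmit run = pvEmit' (run.map pvLower) := by
  simp [pvEmit, pvEmit']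

-- unfolding B one maximal run at a time, from any starting list
theorem bGo_run (cs : List Char) :
    bGo cs = pvEmit' ((cs.takeWhile pvIsLetter).map pvLower) ++ bGo (cs.dropWhile pvIsLetter) := by
  match cs with
  | [] => simp [bGo, pvEmit']
  | c :: rest =>
    by_cases h : pvIsLetter c = true
    · rw [bGo, if_pos h, List.takeWhile_cons_of_pos h, List.dropWhile_cons_of_pos h,
        pvEmit_eq]
    · rw [List.takeWhile_cons_of_neg h, List.dropWhile_cons_of_neg h]
      simp [pvEmit']

-- main invariant: A from state (.., current) equals emitting current++run then B on the rest
theorem aGo_eq (cs : List Char) : ∀ current,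
    aGo cs [] current =
      pvEmit' (current ++ (cs.takeWhile pvIsLetter).map pvLower) ++ bGo (cs.dropWhile pvIsLetter) := by
  induction cs with
  | nil =>
    intro current
    simp [aGo, pvEmit', bGo]
  | cons c rest ih =>
    intro current
    by_cases h : pvIsLetter c = true
    · rw [aGo, if_pos h, ih, List.takeWhile_cons_of_pos h, List.dropWhile_cons_of_pos h]
      simp
    · have hb : bGo (c :: rest) = bGo rest := by rw [bGo, if_neg h]
      rw [aGo, if_neg h, aGo_words, ih, List.takeWhile_cons_of_neg h,
        List.dropWhile_cons_of_neg h, hb, bGo_run rest]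
      simp [pvEmit']

theorem main (cs : List Char) : aGo cs [] [] = bGo cs := by
  rw [aGo_eq, bGo_run cs]
  simp

-- ===== VERDICT (by name: the statement is the Claim_ definition above) =====
theorem extract_hint_words_py_spec : Claim_equal_extract_hint_words_py := by
  intro text _
  unfold Spec_extract_hint_words_py extract_hint_words_py extract_hint_words_py_alt
  exact main _
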